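-- pv_equiv track=rewrite | github.com/Georgeiibrahim/apriori-Alg | apriori.py | stage_2
-- ===== SOURCE A (Python) =====
-- import itertools
--
-- def stage_2(l1, records, minimum_support_count):
--     l1 = sorted(list(l1.keys()))
--     L1 = list(itertools.combinations(l1, 2))
--     c2 = {}
--     l2 = {}
--     for iter1 in L1:
--         count = 0
--         for iter2 in records:
--             if sublist(iter1, iter2):
--                 count+=1
--         c2[iter1] = count
--     for key, value in c2.items():
--         if value >= minimum_support_count:
--             if check_subset_frequency(key, l1, 1):
--                 l2[key] = value
--
--     return c2, l2
--
-- def sublist(lst1, lst2):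
--     return set(lst1) <= set(lst2)
--
-- def check_subset_frequency(itemset, l, n):
--     if n>1:
--         subsets = list(itertools.combinations(itemset, n))
--     else:
--         subsets = itemset
--     for iter1 in subsets:
--         if not iter1 in l:
--             return False
--     return True
-- ===== SOURCE B (Python) =====
-- import itertools
--
-- def stage_2(l1, records, minimum_support_count):
--     keys = sorted(l1)
--     # inverted index: item -> set of indices of records containing it
--     post = {k: {i for i, rec in enumerate(records) if k in rec} for k in keys}
--     c2 = {}
--     for pair in itertools.combinations(keys, 2):
--         a, b = pair
--         c2[pair] = len(post[a] & post[b])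
--     l2 = {k: v for k, v in c2.items() if v >= minimum_support_count}
--     return c2, l2
-- ===== Notes on version B (the rewrite author's own statement) =====
-- stated objective: faster
-- what changed: Replaces the per-pair rescan of all records (building two sets per pair per record) with an inverted index item->record-index-set built in one pass, so each pair's count is one set intersection; the always-true check_subset_frequency call is dropped.
import Mathlib
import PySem

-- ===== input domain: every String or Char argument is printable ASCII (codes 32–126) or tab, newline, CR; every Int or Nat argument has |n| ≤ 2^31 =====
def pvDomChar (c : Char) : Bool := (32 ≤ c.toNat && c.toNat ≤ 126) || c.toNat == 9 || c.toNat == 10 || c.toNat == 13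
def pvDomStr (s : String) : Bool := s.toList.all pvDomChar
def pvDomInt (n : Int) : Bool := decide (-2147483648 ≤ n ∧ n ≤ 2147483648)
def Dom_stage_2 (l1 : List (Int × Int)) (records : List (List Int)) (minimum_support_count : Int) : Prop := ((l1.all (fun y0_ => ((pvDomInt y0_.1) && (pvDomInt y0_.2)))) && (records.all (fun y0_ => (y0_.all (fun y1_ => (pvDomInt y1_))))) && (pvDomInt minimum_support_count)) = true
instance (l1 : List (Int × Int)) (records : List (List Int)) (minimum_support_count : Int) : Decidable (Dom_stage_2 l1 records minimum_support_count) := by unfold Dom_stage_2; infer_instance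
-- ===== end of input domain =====

-- B replaces A's per-pair rescan of all records with an inverted index (item -> set of record indices) and one set intersection per pair; faster by avoiding repeated record scans.


-- ===== PORT A =====
-- set(lst1) <= set(lst2)
def pvSublist (lst1 lst2 : List Int) : Bool :=
  PySem.Set.issubset (PySem.Set.ofList lst1) (PySem.Set.ofList lst2)

-- check_subset_frequency, specialised to its only call site n = 1 (the n>1 branch is dead there);
-- the early-return membership loop over `itemset` is `List.all`
def pvCheckSubsetFrequency (itemset : List Int) (l : List Int) : Bool :=
  itemset.all (fun x => l.contains x)

def stage_2 (l1 : List (Int × Int)) (records : List (List Int)) (minimum_support_count : Int) : (List (List Int × Int)) × (List (List Int × Int)) :=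
  let l1s := PySem.List.sorted (PySem.Dict.keys (PySem.Dict.mk l1)) (fun x => x) false
  let L1 := PySem.List.combinations l1s 2
  let c2 := L1.foldl (fun d iter1 =>
      d.insert iter1
        (records.foldl (fun count iter2 => if pvSublist iter1 iter2 then count + 1 else count) (0 : Int)))
    PySem.Dict.empty
  let l2 := c2.items.foldl (fun d kv =>
      if kv.2 ≥ minimum_support_count then
        if pvCheckSubsetFrequency kv.1 l1s then d.insert kv.1 kv.2 else d
      else d)
    PySem.Dict.empty
  (c2.items, l2.items)

-- ===== PORT B =====
-- {i for i, rec in enumerate(records) if k in rec}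
def pvPost (records : List (List Int)) (k : Int) : PySem.Set Int :=
  (PySem.List.enumerate records 0).foldl
    (fun s p => if p.2.contains k then PySem.Set.add s p.1 else s) PySem.Set.empty

def stage_2_alt (l1 : List (Int × Int)) (records : List (List Int)) (minimum_support_count : Int) : (List (List Int × Int)) × (List (List Int × Int)) :=
  let keys := PySem.List.sorted (PySem.Dict.keys (PySem.Dict.mk l1)) (fun x => x) false
  let post := keys.foldl (fun d k => d.insert k (pvPost records k)) PySem.Dict.empty
  let c2 := (PySem.List.combinations keys 2).foldl (fun d pair =>
      match pair with
      | [a, b] => d.insert pair (PySem.Set.len (PySem.Set.inter (post.getD a PySem.Set.empty) (post.getD b PySem.Set.empty)))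
      | _ => d)   -- unreachable: combinations _ 2 yields only length-2 lists ('a, b = pair' never raises)
    PySem.Dict.empty
  let l2 := c2.items.foldl (fun d kv =>
      if kv.2 ≥ minimum_support_count then d.insert kv.1 kv.2 else d)
    PySem.Dict.empty
  (c2.items, l2.items)

-- ===== PRECONDITION & SPEC =====
def Spec_stage_2 (l1 : List (Int × Int)) (records : List (List Int)) (minimum_support_count : Int) (out : (List (List Int × Int)) × (List (List Int × Int))) : Prop := out = stage_2_alt l1 records minimum_support_count
instance (l1 : List (Int × Int)) (records : List (List Int)) (minimum_support_count : Int) (out : (List (List Int × Int)) × (List (List Int × Int))) : Decidable (Spec_stage_2 l1 records minimum_support_count out) := by unfold Spec_stage_2; infer_instance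

-- ===== CLAIM (what is proved, stated in full; the proofs are below) =====
def Claim_equal_stage_2 : Prop := ∀ (l1 : List (Int × Int)) (records : List (List Int)) (minimum_support_count : Int), Dom_stage_2 l1 records minimum_support_count → Spec_stage_2 l1 records minimum_support_count (stage_2 l1 records minimum_support_count)

-- ===== LEMMAS AND PROOFS =====

-- get? after a fold that inserts f x at each key x of l
theorem pv_get?_foldl_insert {β : Type} (f : Int → β) (l : List Int) (d : PySem.Dict Int β) (k : Int) :
    (l.foldl (fun d x => d.insert x (f x)) d).get? k = if k ∈ l then some (f k) else d.get? k := by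
  induction l generalizing d with
  | nil => simp
  | cons x xs ih =>
    rw [List.foldl_cons, ih]
    by_cases hx : k ∈ xs
    · simp [hx]
    · by_cases hk : k = x
      · subst hk; simp [hx, PySem.Dict.get?_insert_self]
      · simp [hx, hk, PySem.Dict.get?_insert_of_ne _ _ hk]

theorem pv_getD_post (records : List (List Int)) (keys : List Int) (a : Int) (ha : a ∈ keys) :
    (keys.foldl (fun d k => d.insert k (pvPost records k)) PySem.Dict.empty).getD a PySem.Set.empty
      = pvPost records a := by
  rw [PySem.Dict.getD_eq_get?_getD, pv_get?_foldl_insert]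
  simp [ha]

-- the set comprehension builds exactly the (increasing, duplicate-free) index list
theorem pv_post_go (k : Int) (rs : List (List Int)) (s : Int) (acc : List Int)
    (hacc : ∀ i ∈ acc, i < s) :
    (PySem.List.enumerate rs s).foldl
        (fun s' p => if p.2.contains k then PySem.Set.add s' p.1 else s') acc
      = acc ++ ((PySem.List.enumerate rs s).filter (fun p => p.2.contains k)).map Prod.fst := by
  induction rs generalizing s acc with
  | nil => simp [PySem.List.enumerate]
  | cons r rs ih =>
    rw [PySem.List.enumerate_cons, List.foldl_cons, List.filter_cons]
    dsimp only
    by_cases hr : r.contains k = true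
    · have hns : s ∉ acc := fun hmem => lt_irrefl s (hacc s hmem)
      have hadd : PySem.Set.add acc s = acc ++ [s] := by
        simp [PySem.Set.add, PySem.Set.contains, List.contains_eq_mem, hns]
      have hacc' : ∀ i ∈ acc ++ [s], i < s + 1 := by
        intro i hi
        rcases List.mem_append.mp hi with h | h
        · have := hacc i h; omega
        · simp at h; omega
      rw [if_pos hr, if_pos hr, hadd, ih (s + 1) (acc ++ [s]) hacc']
      simp
    · rw [if_neg hr, if_neg hr]
      exact ih (s + 1) acc (fun i hi => by have := hacc i hi; omega)

theorem pv_post_eq (records : List (List Int)) (k : Int) :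
    pvPost records k
      = ((PySem.List.enumerate records 0).filter (fun p => p.2.contains k)).map Prod.fst := by
  have := pv_post_go k records 0 [] (by intro i hi; simp at hi)
  simpa [pvPost] using this

-- the first components of enumerate are distinct
theorem pv_enum_fst_inj (rs : List (List Int)) (s : Int) {p q : Int × List Int}
    (hp : p ∈ PySem.List.enumerate rs s) (hq : q ∈ PySem.List.enumerate rs s)
    (h : p.1 = q.1) : p = q := by
  rw [PySem.List.mem_enumerate_iff] at hp hq
  obtain ⟨k1, hk1, rfl⟩ := hp
  obtain ⟨k2, hk2, rfl⟩ := hq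
  simp only at h
  have : k1 = k2 := by omega
  subst this; rfl

theorem pv_contains_post (records : List (List Int)) (b : Int) (p : Int × List Int)
    (hp : p ∈ PySem.List.enumerate records 0) :
    (pvPost records b).contains p.1 = p.2.contains b := by
  simp only [PySem.Set.contains_eq_listContains, List.contains_eq_mem]
  apply decide_eq_decide.mpr
  rw [pv_post_eq]
  constructor
  · intro hmem
    obtain ⟨q, hq, hq1⟩ := List.mem_map.mp hmem
    obtain ⟨hqE, hqb⟩ := List.mem_filter.mp hq
    have := pv_enum_fst_inj records 0 hqE hp hq1
    subst this
    simpa using hqb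
  · intro hb
    exact List.mem_map.mpr ⟨p, List.mem_filter.mpr ⟨hp, by simp [hb]⟩, rfl⟩

theorem pv_sublist_pair (a b : Int) (r : List Int) :
    pvSublist [a, b] r = (r.contains a && r.contains b) := by
  rw [Bool.eq_iff_iff, pvSublist, PySem.Set.issubset_iff]
  simp [PySem.Set.mem_ofList]

theorem pv_countP_enumerate (P : List Int → Bool) (rs : List (List Int)) (s : Int) :
    ((PySem.List.enumerate rs s).filter (fun p => P p.2)).length = rs.countP P := by
  induction rs generalizing s with
  | nil => simp [PySem.List.enumerate]
  | cons r rs ih =>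
    rw [PySem.List.enumerate_cons]
    by_cases hr : P r <;> simp [hr, ih]

-- the per-pair record scan of A equals the intersection size of B's posting sets
theorem pv_count_eq (records : List (List Int)) (a b : Int) :
    records.foldl (fun count r => if pvSublist [a, b] r then count + 1 else count) (0 : Int)
      = PySem.Set.len (PySem.Set.inter (pvPost records a) (pvPost records b)) := by
  rw [PySem.List.foldl_if_add_one]
  have hcount : records.countP (fun r => pvSublist [a, b] r)
      = records.countP (fun r => r.contains a && r.contains b) :=
    List.countP_congr (fun r _ => by rw [pv_sublist_pair])
  have hrhs : PySem.Set.inter (pvPost records a) (pvPost records b)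
      = ((PySem.List.enumerate records 0).filter
          (fun p => p.2.contains b && p.2.contains a)).map Prod.fst := by
    show (pvPost records a).filter (fun x => (pvPost records b).contains x) = _
    rw [pv_post_eq records a, List.filter_map, List.filter_filter]
    congr 1
    apply List.filter_congr
    intro p hp
    simp only [Function.comp]
    rw [pv_contains_post records b p hp]
  rw [hcount]
  show (0 : Int) + _ = ((PySem.Set.inter (pvPost records a) (pvPost records b)).length : Int)
  rw [hrhs, List.length_map, pv_countP_enumerate (fun r => r.contains b && r.contains a)]
  have : records.countP (fun r => r.contains a && r.contains b)
      = records.countP (fun r => r.contains b && r.contains a) :=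
    List.countP_congr (fun r _ => by rw [Bool.and_comm])
  omega

theorem stage_2_eq (l1 : List (Int × Int)) (records : List (List Int)) (msc : Int) :
    stage_2 l1 records msc = stage_2_alt l1 records msc := by
  simp only [stage_2, stage_2_alt]
  set keys := PySem.List.sorted (PySem.Dict.keys (PySem.Dict.mk l1)) (fun x => x) false with hkeys
  set post := keys.foldl (fun d k => d.insert k (pvPost records k)) PySem.Dict.empty with hpost
  have hc2 : (PySem.List.combinations keys 2).foldl (fun d iter1 =>
        d.insert iter1 (records.foldl
          (fun count iter2 => if pvSublist iter1 iter2 then count + 1 else count) (0 : Int)))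
        PySem.Dict.empty
      = (PySem.List.combinations keys 2).foldl (fun d pair =>
          match pair with
          | [a, b] => d.insert pair (PySem.Set.len (PySem.Set.inter
              (post.getD a PySem.Set.empty) (post.getD b PySem.Set.empty)))
          | _ => d) PySem.Dict.empty := by
    apply PySem.List.foldl_congr_mem
    intro d pr hpr
    obtain ⟨hsub, hlen⟩ := (PySem.List.mem_combinations_iff keys 2 pr).mp hpr
    obtain ⟨a, b, rfl⟩ := List.length_eq_two.mp hlen
    have ha : a ∈ keys := hsub.subset (by simp)
    have hb : b ∈ keys := hsub.subset (by simp)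
    show d.insert [a, b] _ = d.insert [a, b] _
    rw [hpost, pv_getD_post records keys a ha, pv_getD_post records keys b hb, pv_count_eq]
  have hkeysA : ∀ kv : List Int × Int, kv ∈ ((PySem.List.combinations keys 2).foldl (fun d iter1 =>
        d.insert iter1 (records.foldl
          (fun count iter2 => if pvSublist iter1 iter2 then count + 1 else count) (0 : Int)))
        PySem.Dict.empty).items → kv.1 ∈ PySem.List.combinations keys 2 := by
    intro kv hkv
    have hk : kv.1 ∈ ((PySem.List.combinations keys 2).foldl (fun d iter1 =>
        d.insert iter1 (records.foldl
          (fun count iter2 => if pvSublist iter1 iter2 then count + 1 else count) (0 : Int)))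
        PySem.Dict.empty).keys := List.mem_map_of_mem hkv
    rw [PySem.Dict.keys_foldl_insert] at hk
    rcases (PySem.Set.mem_update _ _ _).mp hk with h | h
    · simp [PySem.Dict.keys_empty] at h
    · exact h
  have hl2 : ((PySem.List.combinations keys 2).foldl (fun d iter1 =>
        d.insert iter1 (records.foldl
          (fun count iter2 => if pvSublist iter1 iter2 then count + 1 else count) (0 : Int)))
        PySem.Dict.empty).items.foldl (fun d kv =>
        if kv.2 ≥ msc then
          if pvCheckSubsetFrequency kv.1 keys then d.insert kv.1 kv.2 else d
        else d) PySem.Dict.empty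
      = ((PySem.List.combinations keys 2).foldl (fun d iter1 =>
        d.insert iter1 (records.foldl
          (fun count iter2 => if pvSublist iter1 iter2 then count + 1 else count) (0 : Int)))
        PySem.Dict.empty).items.foldl (fun d kv =>
          if kv.2 ≥ msc then d.insert kv.1 kv.2 else d) PySem.Dict.empty := by
    apply PySem.List.foldl_congr_mem
    intro d kv hkv
    obtain ⟨hsub, hlen⟩ := (PySem.List.mem_combinations_iff keys 2 kv.1).mp (hkeysA kv hkv)
    have hchk : pvCheckSubsetFrequency kv.1 keys = true := by
      rw [pvCheckSubsetFrequency, List.all_eq_true]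
      intro x hx
      simp only [List.contains_eq_mem, decide_eq_true_eq]
      exact hsub.subset hx
    rw [hchk]
    simp
  rw [hl2, hc2]

-- ===== VERDICT (by name: the statement is the Claim_ definition above) =====
theorem stage_2_spec : Claim_equal_stage_2 := by
  intro l1 records msc _
  show stage_2 l1 records msc = stage_2_alt l1 records msc
  exact stage_2_eq l1 records msc
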